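-- pv_equiv track=rewrite | github.com/camiiutd/algo1_2k24_1C | 2cuatri/python/parciales/parcialAmaDeCasa.py | viajes_por_dia
-- ===== SOURCE A (Python) =====
-- def pertenece(elemento,lista):
--     for e in lista:
--         if e == elemento:
--             return True
--     return False
--
-- def viajes_por_dia(viajes_diarios:dict[int,list[str]],usuarios:list[str])->dict[tuple[str,int]]:
--     res:dict={}
--     for nombre in usuarios:
--         res[nombre]=0
--
--     for llaves,valores in viajes_diarios.items():
--         for nombre in usuarios:
--             if pertenece(nombre,valores):
--                 res[nombre]+=1
--
--     return res
-- ===== SOURCE B (Python) =====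
-- def viajes_por_dia(viajes_diarios, usuarios):
--     # one pass over the trip data: dias[name] = number of days whose list mentions name
--     dias = {}
--     for valores in viajes_diarios.values():
--         for nombre in set(valores):
--             dias[nombre] = dias.get(nombre, 0) + 1
--     # then accumulate per requested user (duplicates in usuarios accumulate, as in A)
--     res = {}
--     for nombre in usuarios:
--         res[nombre] = res.get(nombre, 0) + dias.get(nombre, 0)
--     return res
-- ===== Notes on version B (the rewrite author's own statement) =====
-- stated objective: faster
-- what changed: B inverts the traversal: one pass over the trip data builds a per-day-deduplicated dict of day-counts per name, then a single accumulation pass over usuarios, removing A's per-user-per-day linear membership scan.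
import Mathlib
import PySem

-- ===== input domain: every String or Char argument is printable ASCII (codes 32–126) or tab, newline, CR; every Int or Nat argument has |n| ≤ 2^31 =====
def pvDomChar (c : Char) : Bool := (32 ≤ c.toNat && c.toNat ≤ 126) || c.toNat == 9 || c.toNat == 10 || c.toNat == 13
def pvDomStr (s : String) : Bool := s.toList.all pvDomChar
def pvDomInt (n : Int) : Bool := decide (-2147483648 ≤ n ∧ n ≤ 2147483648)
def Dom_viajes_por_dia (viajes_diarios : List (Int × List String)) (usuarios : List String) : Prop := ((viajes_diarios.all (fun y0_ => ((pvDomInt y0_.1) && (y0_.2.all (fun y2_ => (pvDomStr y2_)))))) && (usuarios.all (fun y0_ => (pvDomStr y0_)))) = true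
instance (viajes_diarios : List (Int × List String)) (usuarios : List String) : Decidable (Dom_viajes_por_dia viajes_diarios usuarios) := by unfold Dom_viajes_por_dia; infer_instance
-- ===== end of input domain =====

-- B replaces A's per-user-per-day membership scan by one pass over the trip data building a
-- day-count dict, then one accumulation pass over usuarios (faster; return value proved equal).

-- ===== PORT A =====
def pertenece (elemento : String) (lista : List String) : Bool :=
  match lista with
  | [] => false
  | e :: rest => if e == elemento then true else pertenece elemento rest

def viajes_por_dia (viajes_diarios : List (Int × List String)) (usuarios : List String) : List (String × Int) :=
  let res0 : PySem.Dict String Int := usuarios.foldl (fun r nombre => r.insert nombre 0) PySem.Dict.empty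
  -- res[nombre] += 1: the key is always present (seeded above), so Dict.modify is exact here
  let res := viajes_diarios.foldl
    (fun r kv => usuarios.foldl (fun r nombre => if pertenece nombre kv.2 then r.modify nombre 0 (· + 1) else r) r)
    res0
  res.items

-- ===== PORT B =====
def viajes_por_dia_alt (viajes_diarios : List (Int × List String)) (usuarios : List String) : List (String × Int) :=
  -- 'for nombre in set(valores)': counts accumulated into dias are iteration-order independent
  let dias : PySem.Dict String Int := viajes_diarios.foldl
    (fun d kv => (PySem.Set.ofList kv.2).foldl (fun d nombre => d.insert nombre (d.getD nombre 0 + 1)) d)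
    PySem.Dict.empty
  let res : PySem.Dict String Int := usuarios.foldl
    (fun r nombre => r.insert nombre (r.getD nombre 0 + dias.getD nombre 0))
    PySem.Dict.empty
  res.items

-- ===== PRECONDITION & SPEC =====
def Spec_viajes_por_dia (viajes_diarios : List (Int × List String)) (usuarios : List String) (out : List (String × Int)) : Prop := out = viajes_por_dia_alt viajes_diarios usuarios
instance (viajes_diarios : List (Int × List String)) (usuarios : List String) (out : List (String × Int)) : Decidable (Spec_viajes_por_dia viajes_diarios usuarios out) := by unfold Spec_viajes_por_dia; infer_instance

-- ===== CLAIM (what is proved, stated in full; the proofs are below) =====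
def Claim_equal_viajes_por_dia : Prop := ∀ (viajes_diarios : List (Int × List String)) (usuarios : List String), Dom_viajes_por_dia viajes_diarios usuarios → Spec_viajes_por_dia viajes_diarios usuarios (viajes_por_dia viajes_diarios usuarios)

-- ===== LEMMAS AND PROOFS =====

theorem pertenece_eq_decide (v : String) (l : List String) : pertenece v l = decide (v ∈ l) := by
  induction l with
  | nil => simp [pertenece]
  | cons e rest ih =>
      by_cases h : e = v
      · simp [pertenece, h]
      · simp [pertenece, h, ih, Ne.symm h]

-- seeding loop keeps every value 0
theorem getD_seed (us : List String) (d : PySem.Dict String Int) (v : String)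
    (h : d.getD v 0 = 0) :
    (us.foldl (fun r n => r.insert n 0) d).getD v 0 = 0 := by
  induction us generalizing d with
  | nil => exact h
  | cons x t ih =>
      rw [List.foldl_cons]
      apply ih
      rw [PySem.Dict.getD_insert]
      split
      · rfl
      · exact h

-- B's accumulation loop over usuarios
theorem getD_accum (us : List String) (g : String → Int) (d : PySem.Dict String Int) (v : String) :
    (us.foldl (fun r n => r.insert n (r.getD n 0 + g n)) d).getD v 0
      = d.getD v 0 + (us.count v : Int) * g v := by
  induction us generalizing d with
  | nil => simp
  | cons x t ih =>
      rw [List.foldl_cons, ih, PySem.Dict.getD_insert, List.count_cons]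
      by_cases h : v = x
      · subst h; simp; ring
      · simp [h]; exact Or.inl (Ne.symm h)

-- keys of B's accumulation loop
theorem keys_accum (us : List String) (g : PySem.Dict String Int → String → Int) :
    (us.foldl (fun r n => r.insert n (g r n)) (PySem.Dict.empty : PySem.Dict String Int)).keys
      = PySem.Set.ofList us := by
  rw [PySem.Dict.keys_foldl_insert us g PySem.Dict.empty]
  simp [PySem.Dict.keys_empty, PySem.Set.update_nil_left]

-- A's inner (per-day) loop over usuarios
theorem getD_innerA (us : List String) (vals : List String) (d : PySem.Dict String Int) (v : String) :
    (us.foldl (fun r n => if pertenece n vals then r.modify n 0 (· + 1) else r) d).getD v 0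
      = d.getD v 0 + (if v ∈ vals then (us.count v : Int) else 0) := by
  rw [PySem.List.foldl_if_eq_foldl_filter, PySem.Dict.getD_foldl_modify_add_one]
  have hpf : (fun n => pertenece n vals) = (fun n => decide (n ∈ vals)) :=
    funext (fun n => pertenece_eq_decide n vals)
  have hc : (us.filter (fun n => pertenece n vals)).count v
      = if v ∈ vals then us.count v else 0 := by
    rw [hpf]
    by_cases h : v ∈ vals
    · rw [List.count_filter (by simpa using h), if_pos h]
    · rw [if_neg h]
      exact List.count_eq_zero_of_not_mem (fun hm => h (by simpa using (List.mem_filter.mp hm).2))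
  rw [hc]
  split <;> simp

-- A's outer loop over days
theorem getD_outerA (vd : List (Int × List String)) (us : List String)
    (d : PySem.Dict String Int) (v : String) :
    (vd.foldl (fun r kv => us.foldl (fun r n => if pertenece n kv.2 then r.modify n 0 (· + 1) else r) r) d).getD v 0
      = d.getD v 0 + (us.count v : Int) * (vd.countP (fun kv => decide (v ∈ kv.2)) : Int) := by
  induction vd generalizing d with
  | nil => simp
  | cons kv t ih =>
      rw [List.foldl_cons, ih, getD_innerA, List.countP_cons]
      by_cases h : v ∈ kv.2
      · simp [h]; ring
      · simp [h]

-- count of an element in set(xs)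
theorem count_ofList (xs : List String) (v : String) :
    ((PySem.Set.ofList xs).count v : Int) = if v ∈ xs then 1 else 0 := by
  by_cases h : v ∈ xs
  · have hm : v ∈ PySem.Set.ofList xs := (PySem.Set.mem_ofList xs v).mpr h
    rw [if_pos h, List.count_eq_one_of_mem (PySem.Set.nodup_ofList xs) hm]; rfl
  · have hm : v ∉ PySem.Set.ofList xs := fun hc => h ((PySem.Set.mem_ofList xs v).mp hc)
    simp [h, List.count_eq_zero_of_not_mem hm]

-- B's dias table counts the days mentioning v
theorem getD_dias (vd : List (Int × List String)) (d : PySem.Dict String Int) (v : String) :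
    (vd.foldl (fun d kv => (PySem.Set.ofList kv.2).foldl (fun d n => d.insert n (d.getD n 0 + 1)) d) d).getD v 0
      = d.getD v 0 + (vd.countP (fun kv => decide (v ∈ kv.2)) : Int) := by
  induction vd generalizing d with
  | nil => simp
  | cons kv t ih =>
      rw [List.foldl_cons, ih, PySem.Dict.getD_foldl_insert_add_one, count_ofList, List.countP_cons]
      by_cases h : v ∈ kv.2
      · simp [h]; ring
      · simp [h]

-- Set.update by elements already present is the identity
theorem set_update_subset (l : List String) (s : PySem.Set String) (h : ∀ x ∈ l, x ∈ s) :
    PySem.Set.update s l = s := by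
  induction l generalizing s with
  | nil => rfl
  | cons x t ih =>
      have hx : PySem.Set.contains s x = true := by
        simpa [PySem.Set.contains] using h x (by simp)
      show PySem.Set.update (PySem.Set.add s x) t = s
      rw [PySem.Set.add, if_pos hx]
      exact ih s (fun y hy => h y (by simp [hy]))

-- keys of A's day loop do not change (all usuarios already seeded)
theorem keys_A (vd : List (Int × List String)) (us : List String)
    (d : PySem.Dict String Int) (h : ∀ x ∈ us, x ∈ d.keys) :
    (vd.foldl (fun r kv => us.foldl (fun r n => if pertenece n kv.2 then r.modify n 0 (· + 1) else r) r) d).keys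
      = d.keys := by
  induction vd generalizing d with
  | nil => rfl
  | cons kv t ih =>
      rw [List.foldl_cons]
      have hstep : (us.foldl (fun r n => if pertenece n kv.2 then r.modify n 0 (· + 1) else r) d).keys = d.keys := by
        rw [PySem.List.foldl_if_eq_foldl_filter, PySem.Dict.keys_foldl_modify]
        exact set_update_subset _ _ (fun x hx => h x (List.mem_of_mem_filter hx))
      rw [ih _ (by rw [hstep]; exact h), hstep]

-- items of two dicts with equal keys (nodup) and equal lookups are equal
theorem items_eq_of (dA dB : PySem.Dict String Int) (h1 : dA.keys = dB.keys)
    (h2 : dB.keys.Nodup) (h3 : ∀ k, dA.getD k 0 = dB.getD k 0) : dA.items = dB.items := by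
  rw [PySem.Dict.items_eq_map_keys dA (h1 ▸ h2) (0 : Int),
      PySem.Dict.items_eq_map_keys dB h2 (0 : Int), h1]
  exact List.map_congr_left (fun k _ => by rw [h3])

theorem viajes_eq (vd : List (Int × List String)) (us : List String) :
    viajes_por_dia vd us = viajes_por_dia_alt vd us := by
  unfold viajes_por_dia viajes_por_dia_alt
  set D : PySem.Dict String Int :=
    vd.foldl (fun d kv => (PySem.Set.ofList kv.2).foldl (fun d n => d.insert n (d.getD n 0 + 1)) d)
      PySem.Dict.empty with hD
  set S : PySem.Dict String Int := us.foldl (fun r n => r.insert n 0) PySem.Dict.empty with hS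
  have hSkeys : S.keys = PySem.Set.ofList us := by
    rw [hS]; exact keys_accum us (fun _ _ => 0)
  have hsub : ∀ x ∈ us, x ∈ S.keys := by
    intro x hx; rw [hSkeys]; exact (PySem.Set.mem_ofList us x).mpr hx
  apply items_eq_of
  · rw [keys_A vd us S hsub, hSkeys, keys_accum us (fun r n => r.getD n 0 + D.getD n 0)]
  · rw [keys_accum us (fun r n => r.getD n 0 + D.getD n 0)]
    exact PySem.Set.nodup_ofList us
  · intro k
    rw [getD_outerA vd us S k, getD_accum us (fun n => D.getD n 0) PySem.Dict.empty k,
        hD, getD_dias vd PySem.Dict.empty k]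
    have h0 : S.getD k 0 = 0 := by
      rw [hS]; exact getD_seed us PySem.Dict.empty k (by simp)
    rw [h0]
    simp [PySem.Dict.getD_empty]

-- ===== VERDICT (by name: the statement is the Claim_ definition above) =====
theorem viajes_por_dia_spec : Claim_equal_viajes_por_dia := by
  intro vd us _
  unfold Spec_viajes_por_dia
  exact viajes_eq vd us
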